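-- pv_equiv track=rewrite | github.com/gut-puncture/The-Shape-of-Wisdom | scripts/run_inference.py | reversal_count
-- ===== SOURCE A (Python) =====
-- from typing import Dict, List, Optional, Sequence, Tuple
--
-- def reversal_count(argmax_letters: List[str]) -> int:
--     if not argmax_letters:
--         return 0
--     c = 0
--     for i in range(1, len(argmax_letters)):
--         if argmax_letters[i] != argmax_letters[i - 1]:
--             c += 1
--     return c
-- ===== SOURCE B (Python) =====
-- def reversal_count(argmax_letters):
--     # Count maximal runs of equal consecutive elements, answer = runs - 1.
--     if not argmax_letters:
--         return 0
--     runs = 0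
--     i = 0
--     n = len(argmax_letters)
--     while i < n:
--         head = argmax_letters[i]
--         i += 1
--         while i < n and argmax_letters[i] == head:
--             i += 1
--         runs += 1
--     return runs - 1
-- ===== Notes on version B (the rewrite author's own statement) =====
-- stated objective: alternative
-- what changed: B partitions the list into maximal runs of equal consecutive elements (an outer loop that skips each whole run) and returns runs-1, instead of A's single index loop tallying each unequal adjacent pair.
import Mathlib
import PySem

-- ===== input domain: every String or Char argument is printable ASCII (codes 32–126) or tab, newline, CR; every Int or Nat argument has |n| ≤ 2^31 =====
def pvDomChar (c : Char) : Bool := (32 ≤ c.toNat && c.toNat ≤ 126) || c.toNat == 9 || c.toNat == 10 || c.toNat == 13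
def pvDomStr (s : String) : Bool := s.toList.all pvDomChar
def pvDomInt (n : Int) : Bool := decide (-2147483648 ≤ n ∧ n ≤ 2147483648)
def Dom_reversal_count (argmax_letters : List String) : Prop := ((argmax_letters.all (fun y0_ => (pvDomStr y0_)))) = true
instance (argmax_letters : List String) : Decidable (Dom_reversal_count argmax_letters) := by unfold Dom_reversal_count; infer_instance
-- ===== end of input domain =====

-- B counts maximal runs of equal consecutive elements and returns runs - 1; A tallies unequal adjacent pairs by index. Same value, different decomposition (objective: alternative).

-- ===== PORT A =====
-- indices i and i-1 are always in range (1 ≤ i < len), so pyGetD with a dummy default is exact here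
def reversal_count (argmax_letters : List String) : Int :=
  if argmax_letters = [] then 0
  else
    (PySem.List.pyRange 1 (argmax_letters.length : Int) 1).foldl
      (fun c i =>
        if PySem.List.pyGetD argmax_letters i "" ≠ PySem.List.pyGetD argmax_letters (i - 1) "" then c + 1 else c)
      0

-- ===== PORT B =====
-- inner while loop of Source B skips the current run = dropWhile (· == head) on the tail
def runsB : List String → Int
  | [] => 0
  | x :: t => 1 + runsB (t.dropWhile (· == x))
termination_by l => l.length
decreasing_by
  have := List.length_dropWhile_le (p := fun y => y == x) (l := t)
  simp only [List.length_cons]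
  omega

def reversal_count_alt (argmax_letters : List String) : Int :=
  if argmax_letters = [] then 0 else runsB argmax_letters - 1

-- ===== PRECONDITION & SPEC =====
def Spec_reversal_count (argmax_letters : List String) (out : Int) : Prop := out = reversal_count_alt argmax_letters
instance (argmax_letters : List String) (out : Int) : Decidable (Spec_reversal_count argmax_letters out) := by unfold Spec_reversal_count; infer_instance

-- ===== CLAIM (what is proved, stated in full; the proofs are below) =====
def Claim_equal_reversal_count : Prop := ∀ (argmax_letters : List String), Dom_reversal_count argmax_letters → Spec_reversal_count argmax_letters (reversal_count argmax_letters)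

-- ===== LEMMAS AND PROOFS =====

-- adjacent unequal-pair count, the common meeting point of the two ports
def adjC : List String → Int
  | [] => 0
  | [_] => 0
  | a :: b :: t => (if b ≠ a then 1 else 0) + adjC (b :: t)

-- runsB counts one more than the adjacent-transition count
theorem runsB_eq_adjC (t : List String) (x : String) : runsB (x :: t) = adjC (x :: t) + 1 := by
  match t with
  | [] => simp [runsB, adjC]
  | y :: u =>
    by_cases h : y = x
    · subst h
      have h1 : runsB (y :: y :: u) = runsB (y :: u) := by simp [runsB]
      rw [h1, runsB_eq_adjC u y]
      simp [adjC]
    · have hb : (y == x) = false := by simp [h]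
      have hd : List.dropWhile (fun z => z == x) (y :: u) = y :: u := by
        rw [List.dropWhile_cons, hb]
        simp
      have h1 : runsB (x :: y :: u) = 1 + runsB (y :: u) := by rw [runsB]; rw [hd]
      rw [h1, runsB_eq_adjC u y]
      simp [adjC, h]
      ring
termination_by t.length

theorem pyGetD_append_lt (xs ys : List String) (i : Int) (d : String)
    (h0 : 0 ≤ i) (h1 : i < (xs.length : Int)) :
    PySem.List.pyGetD (xs ++ ys) i d = PySem.List.pyGetD xs i d := by
  rw [PySem.List.pyGetD_eq_getElem (xs ++ ys) d h0 (by simp; omega),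
      PySem.List.pyGetD_eq_getElem xs d h0 h1]
  exact List.getElem_append_left (by omega)

theorem adjC_append (xs : List String) (hx : xs ≠ []) (x : String) :
    adjC (xs ++ [x]) = adjC xs + (if x ≠ xs.getLast hx then 1 else 0) := by
  induction xs with
  | nil => exact absurd rfl hx
  | cons a t ih =>
    match t with
    | [] => simp [adjC]
    | b :: u =>
      have h := ih (by simp)
      have e1 : adjC (a :: b :: (u ++ [x])) = (if b ≠ a then 1 else 0) + adjC (b :: (u ++ [x])) := rfl
      have e2 : adjC (a :: b :: u) = (if b ≠ a then 1 else 0) + adjC (b :: u) := rfl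
      have e3 : (a :: b :: u).getLast hx = (b :: u).getLast (by simp) := by
        simp [List.getLast]
      simp only [List.cons_append] at h e1 ⊢
      rw [e1, e2, h, e3]
      ring

theorem foldA_eq_adjC (xs : List String) :
    (PySem.List.pyRange 1 (xs.length : Int) 1).foldl
      (fun c i => if PySem.List.pyGetD xs i "" ≠ PySem.List.pyGetD xs (i - 1) "" then c + 1 else c)
      0 = adjC xs := by
  induction xs using List.reverseRecOn with
  | nil => rw [PySem.List.pyRange_one_eq_nil (by simp)]; rfl
  | append_singleton xs x ih =>
    match xs, ih with
    | [], _ =>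
      rw [show (([] ++ [x] : List String).length : Int) = 1 by simp,
          PySem.List.pyRange_one_eq_nil (by omega)]
      rfl
    | a :: t, ih =>
      set xs := a :: t with hxs
      have hne : xs ≠ [] := by simp [hxs]
      have hlen : ((xs ++ [x]).length : Int) = (xs.length : Int) + 1 := by
        simp [List.length_append]
      have hn : (1 : Int) ≤ (xs.length : Int) := by simp [hxs]
      rw [hlen, PySem.List.pyRange_one_succ_right hn, List.foldl_append]
      have hcong : (PySem.List.pyRange 1 (xs.length : Int) 1).foldl
          (fun c i => if PySem.List.pyGetD (xs ++ [x]) i "" ≠ PySem.List.pyGetD (xs ++ [x]) (i - 1) "" then c + 1 else c) (0 : Int)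
          = (PySem.List.pyRange 1 (xs.length : Int) 1).foldl
          (fun c i => if PySem.List.pyGetD xs i "" ≠ PySem.List.pyGetD xs (i - 1) "" then c + 1 else c) (0 : Int) := by
        apply PySem.List.foldl_congr_mem
        intro acc i hi
        rw [PySem.List.mem_pyRange_one] at hi
        rw [pyGetD_append_lt xs [x] i "" (by omega) (by omega),
            pyGetD_append_lt xs [x] (i - 1) "" (by omega) (by omega)]
      simp only [List.foldl_cons, List.foldl_nil]
      rw [hcong, ih]
      have hget1 : PySem.List.pyGetD (xs ++ [x]) (xs.length : Int) "" = x := by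
        rw [PySem.List.pyGetD_eq_getElem (xs ++ [x]) "" (by omega) (by simp)]
        simp [hxs]
      have hget2 : PySem.List.pyGetD (xs ++ [x]) ((xs.length : Int) - 1) "" = xs.getLast hne := by
        rw [PySem.List.pyGetD_eq_getElem (xs ++ [x]) "" (by omega) (by simp)]
        have htn : ((xs.length : Int) - 1).toNat = xs.length - 1 := by omega
        rw [List.getElem_append_left (by rw [htn]; have := List.length_pos_iff.mpr hne; omega)]
        rw [List.getLast_eq_getElem hne]
        congr 1
      rw [adjC_append xs hne x]
      simp only [hget1, hget2]
      split_ifs <;> simp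

theorem reversal_count_spec : Claim_equal_reversal_count := by
  intro xs _
  unfold Spec_reversal_count reversal_count reversal_count_alt
  by_cases h : xs = []
  · simp [h]
  · rw [if_neg h, if_neg h, foldA_eq_adjC]
    match xs, h with
    | a :: t, _ => rw [runsB_eq_adjC t a]; ring
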